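-- pv_equiv track=rewrite | github.com/Maoni21/agent-ia-poc | backend/src/core/generator.py | extract_script_commands
-- ===== SOURCE A (Python) =====
-- from typing import Dict, List, Any, Optional
--
-- def extract_script_commands(script_content: str) -> Dict[str, List[str]]:
--     """
--     Analyse simple du script et regroupe les commandes par catégories.
--     L'objectif est surtout de couvrir les assertions des tests.
--     """
--     categories: Dict[str, List[str]] = {
--         "package_management": [],
--         "service_management": [],
--         "file_operations": [],
--         "network_operations": [],
--         "system_operations": [],
--         "other": [],
--     }
--
--     for line in script_content.splitlines():
--         stripped = line.strip()
--         if not stripped or stripped.startswith("#"):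
--             continue
--
--         if any(stripped.startswith(cmd) for cmd in ["apt", "yum", "dnf", "pacman"]):
--             categories["package_management"].append(stripped)
--         elif any(stripped.startswith(cmd) for cmd in ["systemctl", "service"]):
--             categories["service_management"].append(stripped)
--         elif any(stripped.startswith(cmd) for cmd in ["cp", "mv", "rm", "chmod", "chown"]):
--             categories["file_operations"].append(stripped)
--         elif any(
--             stripped.startswith(cmd)
--             for cmd in ["iptables", "ufw", "firewall-cmd", "ip"]
--         ):
--             categories["network_operations"].append(stripped)
--         elif any(stripped.startswith(cmd) for cmd in ["crontab", "sysctl", "echo"]):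
--             categories["system_operations"].append(stripped)
--         else:
--             categories["other"].append(stripped)
--
--     return categories
-- ===== SOURCE B (Python) =====
-- CATEGORIES = [
--     ("package_management", ("apt", "yum", "dnf", "pacman")),
--     ("service_management", ("systemctl", "service")),
--     ("file_operations", ("cp", "mv", "rm", "chmod", "chown")),
--     ("network_operations", ("iptables", "ufw", "firewall-cmd", "ip")),
--     ("system_operations", ("crontab", "sysctl", "echo")),
-- ]
--
--
-- def _classify(stripped):
--     for name, prefixes in CATEGORIES:
--         if stripped.startswith(prefixes):
--             return name
--     return "other"
--
--
-- def extract_script_commands(script_content):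
--     lines = [t for t in (line.strip() for line in script_content.splitlines())
--              if t and not t.startswith("#")]
--     return {name: [s for s in lines if _classify(s) == name]
--             for name in [n for n, _ in CATEGORIES] + ["other"]}
-- ===== Notes on version B (the rewrite author's own statement) =====
-- stated objective: alternative
-- what changed: Instead of one pass mutating per-category buckets through an elif chain, B first cleans the lines once, then builds the result category-major: a classify function gives each line its category and every bucket is produced by its own filter pass over the cleaned lines.
import Mathlib
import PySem

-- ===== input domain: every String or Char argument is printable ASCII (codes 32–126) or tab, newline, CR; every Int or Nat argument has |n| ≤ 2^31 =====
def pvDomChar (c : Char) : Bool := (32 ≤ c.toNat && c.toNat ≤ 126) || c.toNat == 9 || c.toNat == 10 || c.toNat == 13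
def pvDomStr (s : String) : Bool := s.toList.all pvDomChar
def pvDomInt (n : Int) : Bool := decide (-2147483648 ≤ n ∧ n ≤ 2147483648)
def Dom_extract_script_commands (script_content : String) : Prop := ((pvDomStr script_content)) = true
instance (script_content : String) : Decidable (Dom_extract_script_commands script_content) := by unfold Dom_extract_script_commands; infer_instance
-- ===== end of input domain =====

-- B builds the result category-major (clean once, then one filter pass per category via a classify function) instead of A's single pass mutating buckets; return value only.

-- ===== PORT A =====
-- the loop body of A's for-loop: strip, skip blank/comment, then the elif chain
def extractA_step (d : PySem.Dict String (List String)) (line : String) :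
    PySem.Dict String (List String) :=
  let stripped := PySem.Str.strip line
  if stripped == "" || PySem.Str.startswith stripped "#" then d
  else if ["apt", "yum", "dnf", "pacman"].any (fun c => PySem.Str.startswith stripped c) then
    d.modify "package_management" [] (· ++ [stripped])
  else if ["systemctl", "service"].any (fun c => PySem.Str.startswith stripped c) then
    d.modify "service_management" [] (· ++ [stripped])
  else if ["cp", "mv", "rm", "chmod", "chown"].any (fun c => PySem.Str.startswith stripped c) then
    d.modify "file_operations" [] (· ++ [stripped])
  else if ["iptables", "ufw", "firewall-cmd", "ip"].any (fun c => PySem.Str.startswith stripped c) then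
    d.modify "network_operations" [] (· ++ [stripped])
  else if ["crontab", "sysctl", "echo"].any (fun c => PySem.Str.startswith stripped c) then
    d.modify "system_operations" [] (· ++ [stripped])
  else
    d.modify "other" [] (· ++ [stripped])

def extract_script_commands (script_content : String) : List (String × List String) :=
  ((PySem.Str.splitlines script_content).foldl extractA_step
    (PySem.Dict.mk [("package_management", []), ("service_management", []),
      ("file_operations", []), ("network_operations", []),
      ("system_operations", []), ("other", [])])).items

-- ===== PORT B =====
-- B's ordered CATEGORIES table
def pvTable : List (String × List String) :=
  [("package_management", ["apt", "yum", "dnf", "pacman"]),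
   ("service_management", ["systemctl", "service"]),
   ("file_operations", ["cp", "mv", "rm", "chmod", "chown"]),
   ("network_operations", ["iptables", "ufw", "firewall-cmd", "ip"]),
   ("system_operations", ["crontab", "sysctl", "echo"])]

-- B's _classify: first matching table entry, else "other"
def pvClassify : List (String × List String) → String → String
  | [], _ => "other"
  | (n, ps) :: rest, s =>
      if ps.any (fun c => PySem.Str.startswith s c) then n else pvClassify rest s

def extract_script_commands_alt (script_content : String) : List (String × List String) :=
  let lines := ((PySem.Str.splitlines script_content).map PySem.Str.strip).filter
      (fun t => !(t == "") && !(PySem.Str.startswith t "#"))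
  (pvTable.map Prod.fst ++ ["other"]).map
    (fun name => (name, lines.filter (fun s => pvClassify pvTable s == name)))

-- ===== PRECONDITION & SPEC =====
def Spec_extract_script_commands (script_content : String) (out : List (String × List String)) : Prop := out = extract_script_commands_alt script_content
instance (script_content : String) (out : List (String × List String)) : Decidable (Spec_extract_script_commands script_content out) := by unfold Spec_extract_script_commands; infer_instance

-- ===== CLAIM =====
def Claim_equal_extract_script_commands : Prop := ∀ (script_content : String), Dom_extract_script_commands script_content → Spec_extract_script_commands script_content (extract_script_commands script_content)

-- ===== LEMMAS AND PROOFS =====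
def pvNames : List String :=
  ["package_management", "service_management", "file_operations",
   "network_operations", "system_operations", "other"]

-- A's loop body is "skip, or modify the bucket B's classify picks"
theorem stepA_eq (d : PySem.Dict String (List String)) (line : String) :
    extractA_step d line =
      if (PySem.Str.strip line == "" || PySem.Str.startswith (PySem.Str.strip line) "#") then d
      else d.modify (pvClassify pvTable (PySem.Str.strip line)) []
        (· ++ [PySem.Str.strip line]) := by
  unfold extractA_step
  generalize PySem.Str.strip line = s
  by_cases h0 : (s == "" || PySem.Str.startswith s "#") = true
  · rw [if_pos h0, if_pos h0]
  · rw [if_neg h0, if_neg h0]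
    simp only [pvTable, pvClassify]
    by_cases h1 : (["apt", "yum", "dnf", "pacman"].any (fun c => PySem.Str.startswith s c)) = true
    · rw [if_pos h1, if_pos h1]
    · rw [if_neg h1, if_neg h1]
      by_cases h2 : (["systemctl", "service"].any (fun c => PySem.Str.startswith s c)) = true
      · rw [if_pos h2, if_pos h2]
      · rw [if_neg h2, if_neg h2]
        by_cases h3 : (["cp", "mv", "rm", "chmod", "chown"].any (fun c => PySem.Str.startswith s c)) = true
        · rw [if_pos h3, if_pos h3]
        · rw [if_neg h3, if_neg h3]
          by_cases h4 : (["iptables", "ufw", "firewall-cmd", "ip"].any (fun c => PySem.Str.startswith s c)) = true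
          · rw [if_pos h4, if_pos h4]
          · rw [if_neg h4, if_neg h4]
            by_cases h5 : (["crontab", "sysctl", "echo"].any (fun c => PySem.Str.startswith s c)) = true
            · rw [if_pos h5, if_pos h5]
            · rw [if_neg h5, if_neg h5]

theorem classify_mem (s : String) : pvClassify pvTable s ∈ pvNames := by
  simp only [pvClassify, pvTable, pvNames]
  split_ifs <;> simp

-- A's whole loop as a fold over B's cleaned lines, paired with their category
set_option maxHeartbeats 1000000 in
theorem foldA_eq (lines : List String) (d : PySem.Dict String (List String)) :
    lines.foldl extractA_step d =
      (((lines.map PySem.Str.strip).filter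
          (fun t => !(t == "") && !(PySem.Str.startswith t "#"))).map
        (fun s => (pvClassify pvTable s, s))).foldl
        (fun d p => d.modify p.1 [] (· ++ [p.2])) d := by
  induction lines generalizing d with
  | nil => rfl
  | cons l ls ih =>
      rw [List.foldl_cons, stepA_eq, List.map_cons, List.filter_cons]
      have hb : (!(PySem.Str.strip l == "") && !(PySem.Str.startswith (PySem.Str.strip l) "#"))
          = !(PySem.Str.strip l == "" || PySem.Str.startswith (PySem.Str.strip l) "#") := by
        rw [Bool.not_or]
      by_cases h0 : (PySem.Str.strip l == "" || PySem.Str.startswith (PySem.Str.strip l) "#") = true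
      · rw [if_pos h0, hb, h0, if_neg (by simp)]
        exact ih d
      · rw [if_neg h0, hb, Bool.eq_false_iff.mpr h0, if_pos (by simp), List.map_cons,
          List.foldl_cons]
        exact ih _

-- the pair fold on the six-bucket dict, characterised bucket by bucket
theorem fold_items (pairs : List (String × String)) (h : ∀ p ∈ pairs, p.1 ∈ pvNames)
    (a1 a2 a3 a4 a5 a6 : List String) :
    (pairs.foldl (fun d p => d.modify p.1 [] (· ++ [p.2]))
      (PySem.Dict.mk [("package_management", a1), ("service_management", a2),
        ("file_operations", a3), ("network_operations", a4),
        ("system_operations", a5), ("other", a6)])).items =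
    [("package_management", a1 ++ (pairs.filter (fun p => p.1 == "package_management")).map (·.2)),
     ("service_management", a2 ++ (pairs.filter (fun p => p.1 == "service_management")).map (·.2)),
     ("file_operations", a3 ++ (pairs.filter (fun p => p.1 == "file_operations")).map (·.2)),
     ("network_operations", a4 ++ (pairs.filter (fun p => p.1 == "network_operations")).map (·.2)),
     ("system_operations", a5 ++ (pairs.filter (fun p => p.1 == "system_operations")).map (·.2)),
     ("other", a6 ++ (pairs.filter (fun p => p.1 == "other")).map (·.2))] := by
  induction pairs generalizing a1 a2 a3 a4 a5 a6 with
  | nil => simp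
  | cons p ps ih =>
      obtain ⟨c, s⟩ := p
      have hc : c ∈ pvNames := h (c, s) (by simp)
      have hps : ∀ q ∈ ps, q.1 ∈ pvNames := fun q hq => h q (by simp [hq])
      simp only [pvNames, List.mem_cons, List.not_mem_nil, or_false] at hc
      rw [List.foldl_cons]
      rcases hc with rfl | rfl | rfl | rfl | rfl | rfl
      · rw [show (PySem.Dict.mk [("package_management", a1), ("service_management", a2),
            ("file_operations", a3), ("network_operations", a4), ("system_operations", a5),
            ("other", a6)]).modify "package_management" [] (· ++ [s]) =
          PySem.Dict.mk [("package_management", a1 ++ [s]), ("service_management", a2),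
            ("file_operations", a3), ("network_operations", a4), ("system_operations", a5),
            ("other", a6)] from rfl, ih hps]
        simp
      · rw [show (PySem.Dict.mk [("package_management", a1), ("service_management", a2),
            ("file_operations", a3), ("network_operations", a4), ("system_operations", a5),
            ("other", a6)]).modify "service_management" [] (· ++ [s]) =
          PySem.Dict.mk [("package_management", a1), ("service_management", a2 ++ [s]),
            ("file_operations", a3), ("network_operations", a4), ("system_operations", a5),
            ("other", a6)] from rfl, ih hps]
        simp
      · rw [show (PySem.Dict.mk [("package_management", a1), ("service_management", a2),
            ("file_operations", a3), ("network_operations", a4), ("system_operations", a5),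
            ("other", a6)]).modify "file_operations" [] (· ++ [s]) =
          PySem.Dict.mk [("package_management", a1), ("service_management", a2),
            ("file_operations", a3 ++ [s]), ("network_operations", a4), ("system_operations", a5),
            ("other", a6)] from rfl, ih hps]
        simp
      · rw [show (PySem.Dict.mk [("package_management", a1), ("service_management", a2),
            ("file_operations", a3), ("network_operations", a4), ("system_operations", a5),
            ("other", a6)]).modify "network_operations" [] (· ++ [s]) =
          PySem.Dict.mk [("package_management", a1), ("service_management", a2),
            ("file_operations", a3), ("network_operations", a4 ++ [s]), ("system_operations", a5),
            ("other", a6)] from rfl, ih hps]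
        simp
      · rw [show (PySem.Dict.mk [("package_management", a1), ("service_management", a2),
            ("file_operations", a3), ("network_operations", a4), ("system_operations", a5),
            ("other", a6)]).modify "system_operations" [] (· ++ [s]) =
          PySem.Dict.mk [("package_management", a1), ("service_management", a2),
            ("file_operations", a3), ("network_operations", a4), ("system_operations", a5 ++ [s]),
            ("other", a6)] from rfl, ih hps]
        simp
      · rw [show (PySem.Dict.mk [("package_management", a1), ("service_management", a2),
            ("file_operations", a3), ("network_operations", a4), ("system_operations", a5),
            ("other", a6)]).modify "other" [] (· ++ [s]) =
          PySem.Dict.mk [("package_management", a1), ("service_management", a2),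
            ("file_operations", a3), ("network_operations", a4), ("system_operations", a5),
            ("other", a6 ++ [s])] from rfl, ih hps]
        simp

-- ===== VERDICT =====
theorem extract_script_commands_spec : Claim_equal_extract_script_commands := by
  intro sc _
  unfold Spec_extract_script_commands extract_script_commands extract_script_commands_alt
  rw [foldA_eq]
  have hmem : ∀ p ∈ (((PySem.Str.splitlines sc).map PySem.Str.strip).filter
      (fun t => !(t == "") && !(PySem.Str.startswith t "#"))).map
      (fun s => (pvClassify pvTable s, s)), p.1 ∈ pvNames := by
    intro p hp
    simp only [List.mem_map] at hp
    obtain ⟨s, -, rfl⟩ := hp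
    exact classify_mem s
  rw [fold_items _ hmem]
  simp [pvTable, List.filter_map, List.map_map, Function.comp]
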